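-- pv_equiv track=rewrite | github.com/ian-iania/totality-precatorios | main_v4_memory.py | divide_pages_into_ranges
-- ===== SOURCE A (Python) =====
-- from typing import List, Dict, Optional, Tuple
--
-- def divide_pages_into_ranges(total_pages: int, num_processes: int) -> List[Tuple[int, int]]:
--     """Divide total pages into ranges for parallel processing"""
--     pages_per_process = total_pages // num_processes
--     remainder = total_pages % num_processes
--
--     ranges = []
--     start = 1
--
--     for i in range(num_processes):
--         extra = 1 if i < remainder else 0
--         end = start + pages_per_process - 1 + extra
--         ranges.append((start, end))
--         start = end + 1
--
--     return ranges
-- ===== SOURCE B (Python) =====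
-- def divide_pages_into_ranges(total_pages: int, num_processes: int):
--     """Divide total pages into ranges for parallel processing"""
--     pages_per_process = total_pages // num_processes
--     remainder = total_pages % num_processes
--     # each range is computed directly from its index: the first `remainder`
--     # processes get one extra page, so process i starts min(i, remainder)
--     # pages later than i * pages_per_process.
--     return [
--         ((s := 1 + i * pages_per_process + min(i, remainder)),
--          s + pages_per_process - 1 + (1 if i < remainder else 0))
--         for i in range(num_processes)
--     ]
-- ===== Notes on version B (the rewrite author's own statement) =====
-- stated objective: alternative
-- what changed: Replaces A's sequential loop carrying a running `start` accumulator with a comprehension that computes each range in closed form from its index i (start = 1 + i*pages_per_process + min(i, remainder)).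
import Mathlib
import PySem

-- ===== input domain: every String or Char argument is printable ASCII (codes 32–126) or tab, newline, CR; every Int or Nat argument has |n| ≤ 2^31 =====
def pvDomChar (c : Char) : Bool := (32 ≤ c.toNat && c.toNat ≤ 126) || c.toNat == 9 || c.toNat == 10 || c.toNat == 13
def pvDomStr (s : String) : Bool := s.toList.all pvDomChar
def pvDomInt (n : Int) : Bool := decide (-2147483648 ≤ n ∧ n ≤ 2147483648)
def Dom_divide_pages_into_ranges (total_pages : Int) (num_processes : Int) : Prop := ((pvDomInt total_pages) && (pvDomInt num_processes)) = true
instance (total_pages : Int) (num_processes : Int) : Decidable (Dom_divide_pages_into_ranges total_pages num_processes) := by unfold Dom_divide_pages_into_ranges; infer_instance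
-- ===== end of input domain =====

-- B computes each range in closed form from its index instead of A's running-start loop; objective: alternative decomposition (same O(n) cost).

-- ===== PORT A =====
def divide_pages_into_ranges (total_pages : Int) (num_processes : Int) : List (Int × Int) :=
  let pages_per_process := PySem.Int.floordiv total_pages num_processes
  let remainder := PySem.Int.mod total_pages num_processes
  let st :=
    (PySem.List.pyRange 0 num_processes 1).foldl
      (fun (st : List (Int × Int) × Int) (i : Int) =>
        let extra : Int := if i < remainder then 1 else 0
        let e := st.2 + pages_per_process - 1 + extra
        (st.1 ++ [(st.2, e)], e + 1))
      ([], 1)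
  st.1

-- ===== PORT B =====
def divide_pages_into_ranges_alt (total_pages : Int) (num_processes : Int) : List (Int × Int) :=
  let pages_per_process := PySem.Int.floordiv total_pages num_processes
  let remainder := PySem.Int.mod total_pages num_processes
  (PySem.List.pyRange 0 num_processes 1).map
    (fun i =>
      let s := 1 + i * pages_per_process + min i remainder
      (s, s + pages_per_process - 1 + (if i < remainder then 1 else 0)))

-- ===== PRECONDITION & SPEC =====
-- Pre_ excludes exactly num_processes = 0, on which the Python A raises ZeroDivisionError.
def Pre_divide_pages_into_ranges (total_pages : Int) (num_processes : Int) : Prop := num_processes ≠ 0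
instance (total_pages : Int) (num_processes : Int) : Decidable (Pre_divide_pages_into_ranges total_pages num_processes) := by unfold Pre_divide_pages_into_ranges; infer_instance
def pvWitness_divide_pages_into_ranges : Int × Int := (10, 3)

def Spec_divide_pages_into_ranges (total_pages : Int) (num_processes : Int) (out : List (Int × Int)) : Prop := out = divide_pages_into_ranges_alt total_pages num_processes
instance (total_pages : Int) (num_processes : Int) (out : List (Int × Int)) : Decidable (Spec_divide_pages_into_ranges total_pages num_processes out) := by unfold Spec_divide_pages_into_ranges; infer_instance

-- ===== CLAIM (what is proved, stated in full; the proofs are below) =====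
def Claim_equal_divide_pages_into_ranges : Prop := ∀ (total_pages : Int) (num_processes : Int), Dom_divide_pages_into_ranges total_pages num_processes → Pre_divide_pages_into_ranges total_pages num_processes → Spec_divide_pages_into_ranges total_pages num_processes (divide_pages_into_ranges total_pages num_processes)

-- ===== LEMMAS AND PROOFS =====

-- Loop invariant: after the first m iterations the accumulator holds the closed-form
-- ranges for indices 0..m-1 and the running start equals 1 + m*ppp + min m rem.
theorem dpir_min_succ (m rem : Int) :
    min (m + 1) rem = min m rem + (if m < rem then 1 else 0) := by
  by_cases h : m < rem <;> simp [min_def] <;> omega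

theorem dpir_fold_invariant (ppp rem : Int) (hrem : 0 ≤ rem) (m : Nat) :
    (PySem.List.pyRange 0 (m : Int) 1).foldl
      (fun (st : List (Int × Int) × Int) (i : Int) =>
        (st.1 ++ [(st.2, st.2 + ppp - 1 + if i < rem then 1 else 0)],
         (st.2 + ppp - 1 + if i < rem then 1 else 0) + 1))
      ([], 1)
    = ((PySem.List.pyRange 0 (m : Int) 1).map
        (fun i =>
          (1 + i * ppp + min i rem,
           1 + i * ppp + min i rem + ppp - 1 + if i < rem then 1 else 0)),
       1 + (m : Int) * ppp + min (m : Int) rem) := by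
  induction m with
  | zero =>
      rw [PySem.List.pyRange_one_eq_nil (by omega)]
      simp
      omega
  | succ m ih =>
      have hsplit : PySem.List.pyRange 0 ((m + 1 : Nat) : Int) 1
          = PySem.List.pyRange 0 (m : Int) 1 ++ [(m : Int)] := by
        push_cast
        exact PySem.List.pyRange_one_succ_right (by omega)
      rw [hsplit, List.foldl_append, List.map_append, ih]
      simp only [List.foldl_cons, List.foldl_nil, List.map_cons, List.map_nil,
        Prod.mk.injEq]
      refine ⟨by trivial, ?_⟩
      push_cast
      rw [dpir_min_succ]
      by_cases h : (m : Int) < rem <;> simp only [h, if_true, if_false] <;> ring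

-- ===== VERDICT (by name: the statement is the Claim_ definition above) =====
theorem divide_pages_into_ranges_spec : Claim_equal_divide_pages_into_ranges := by
  intro t n _ hn
  unfold Pre_divide_pages_into_ranges at hn
  unfold Spec_divide_pages_into_ranges divide_pages_into_ranges divide_pages_into_ranges_alt
  by_cases hpos : 0 < n
  · have hrem : 0 ≤ PySem.Int.mod t n := PySem.Int.mod_nonneg t hpos
    have hcast : n = ((n.toNat : Nat) : Int) := by omega
    rw [hcast] at hrem ⊢
    dsimp only
    rw [dpir_fold_invariant _ _ hrem]
  · dsimp only
    rw [PySem.List.pyRange_one_eq_nil (by omega)]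
    simp
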